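-- pv_equiv track=rewrite | github.com/tsurkisvera/sensitivity-analysis-covasim | sample_parameters_autoencoders.py | proper_employment
-- ===== SOURCE A (Python) =====
-- def proper_employment(arr):
--     final_arr = [i for i in range(101)]
--     for i in range(15):
--         final_arr[i] = 0
--     for i in range(15, 65):
--         final_arr[i] = arr[i // 5 - 3]
--     for i in range(65, 101):
--         final_arr[i] = arr[-1]
--     return final_arr
-- ===== SOURCE B (Python) =====
-- def proper_employment(arr):
--     # run-length decode: the profile is a list of (value, count) runs
--     runs = [(0, 15)] + [(arr[j], 5) for j in range(10)] + [(arr[-1], 36)]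
--     out = []
--     for v, n in runs:
--         out.extend([v] * n)
--     return out
-- ===== Notes on version B (the rewrite author's own statement) =====
-- stated objective: simpler
-- what changed: B represents the profile as run-length data [(0,15)] + [(arr[j],5) for j<10] + [(arr[-1],36)] and decodes it with one extend loop, instead of A's building [0..100] and overwriting it in three index loops with i//5-3 arithmetic.
import Mathlib
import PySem

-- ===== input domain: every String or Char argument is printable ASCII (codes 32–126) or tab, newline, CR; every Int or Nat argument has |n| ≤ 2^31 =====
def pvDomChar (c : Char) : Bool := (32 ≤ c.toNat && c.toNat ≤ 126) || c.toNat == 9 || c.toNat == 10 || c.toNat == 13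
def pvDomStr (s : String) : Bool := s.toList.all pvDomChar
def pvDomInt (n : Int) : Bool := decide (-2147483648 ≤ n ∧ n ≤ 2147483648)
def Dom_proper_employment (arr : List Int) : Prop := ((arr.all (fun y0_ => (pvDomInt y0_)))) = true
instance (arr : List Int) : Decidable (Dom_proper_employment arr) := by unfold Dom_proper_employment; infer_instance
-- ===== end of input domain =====

set_option maxRecDepth 10000


-- B stores the profile as run-length data ((0,15), ten (arr[j],5) runs, (arr[-1],36)) and decodes it with one extend loop, instead of A's in-place overwriting of [0..100]; objective: simpler.
-- ===== PORT A =====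
def proper_employment (arr : List Int) : List Int :=
  let final0 : List Int := (PySem.List.pyRange 0 101 1).map (fun i => i)
  let f1 := (PySem.List.pyRange 0 15 1).foldl (fun fa i => fa.set i.toNat (0 : Int)) final0
  let f2 := (PySem.List.pyRange 15 65 1).foldl
      (fun fa i => fa.set i.toNat (PySem.List.pyGetD arr (PySem.Int.floordiv i 5 - 3) 0)) f1
  let f3 := (PySem.List.pyRange 65 101 1).foldl
      (fun fa i => fa.set i.toNat (PySem.List.pyGetD arr (-1) 0)) f2
  f3

-- ===== PORT B =====
def proper_employment_alt (arr : List Int) : List Int :=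
  let runs : List (Int × Nat) :=
    (0, 15) :: ((List.range 10).map (fun (j : Nat) => (PySem.List.pyGetD arr (j : Int) 0, 5))
      ++ [(PySem.List.pyGetD arr (-1) 0, 36)])
  runs.foldl (fun out vn => out ++ List.replicate vn.2 vn.1) []

-- ===== PRECONDITION & SPEC =====
-- Pre_ excludes arr with fewer than 10 elements: there A raises IndexError (arr[i//5-3] or arr[-1]).
def Pre_proper_employment (arr : List Int) : Prop := 10 ≤ arr.length
instance (arr : List Int) : Decidable (Pre_proper_employment arr) := by unfold Pre_proper_employment; infer_instance
def pvWitness_proper_employment : List Int := [1,2,3,4,5,6,7,8,9,10]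
def Spec_proper_employment (arr : List Int) (out : List Int) : Prop := out = proper_employment_alt arr
instance (arr : List Int) (out : List Int) : Decidable (Spec_proper_employment arr out) := by unfold Spec_proper_employment; infer_instance

-- ===== CLAIM (what is proved, stated in full; the proofs are below) =====
def Claim_equal_proper_employment : Prop := ∀ (arr : List Int), Dom_proper_employment arr → Pre_proper_employment arr → Spec_proper_employment arr (proper_employment arr)

-- ===== LEMMAS AND PROOFS =====

-- run-length decoding by foldl-extend is acc ++ flatMap replicate
theorem rld_eq (runs : List (Int × Nat)) : ∀ (acc : List Int),
    runs.foldl (fun out vn => out ++ List.replicate vn.2 vn.1) acc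
      = acc ++ runs.flatMap (fun vn => List.replicate vn.2 vn.1) := by
  induction runs with
  | nil => intro acc; simp
  | cons r rs ih => intro acc; simp [List.foldl, ih]

-- a foldl of in-place writes preserves the list length
theorem fs_len (g : Int → Int) (is : List Int) (l : List Int) :
    (is.foldl (fun fa i => fa.set i.toNat (g i)) l).length = l.length := by
  induction is generalizing l with
  | nil => rfl
  | cons i is ih => simp [List.foldl, ih]

-- element j of "for i in range(a, b): l[i] = g(i)" (indices nonnegative, j in bounds)
theorem fs_get (g : Int → Int) (a : Int) (ha : 0 ≤ a) :
    ∀ (b : Int) (l : List Int) (j : Nat), j < l.length →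
      ((PySem.List.pyRange a b 1).foldl (fun fa i => fa.set i.toNat (g i)) l)[j]? =
        if a ≤ (j : Int) ∧ (j : Int) < b then some (g (j : Int)) else l[j]? := by
  suffices H : ∀ (n : Nat) (b : Int), (b - a).toNat = n → ∀ (l : List Int) (j : Nat), j < l.length →
      ((PySem.List.pyRange a b 1).foldl (fun fa i => fa.set i.toNat (g i)) l)[j]? =
        if a ≤ (j : Int) ∧ (j : Int) < b then some (g (j : Int)) else l[j]? by
    exact fun b => H (b - a).toNat b rfl
  intro n
  induction n with
  | zero =>
    intro b hn l j hj
    rw [PySem.List.pyRange_one_eq_nil (by omega)]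
    rw [if_neg (by omega)]
    rfl
  | succ n ih =>
    intro b hn l j hj
    have hb : b = (b - 1) + 1 := by omega
    rw [hb, PySem.List.pyRange_one_succ_right (by omega)]
    rw [List.foldl_append]
    simp only [List.foldl]
    rw [List.getElem?_set]
    by_cases hbj : (b - 1).toNat = j
    · rw [if_pos hbj]
      have hlen : j < ((PySem.List.pyRange a (b-1) 1).foldl (fun fa i => fa.set i.toNat (g i)) l).length := by
        rw [fs_len]; exact hj
      rw [if_pos (hbj ▸ hlen)]
      have hb : (j : Int) = b - 1 := by omega
      rw [if_pos (by omega)]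
      rw [hb]
    · rw [if_neg hbj]
      rw [ih (b - 1) (by omega) l j hj]
      by_cases hc : a ≤ (j : Int) ∧ (j : Int) < b - 1
      · rw [if_pos hc, if_pos (by omega)]
      · rw [if_neg hc, if_neg (by omega)]

-- length of the flatMap of 5-element runs
theorem fm_len (f : Nat → Int) (n : Nat) :
    ((List.range n).flatMap (fun j => List.replicate 5 (f j))).length = 5 * n := by
  induction n with
  | zero => rfl
  | succ n ih =>
    rw [List.range_succ, List.flatMap_append, List.length_append, ih]
    simp [Nat.mul_succ]

-- element p of the flatMap of 5-element runs
theorem fm_get (f : Nat → Int) (n : Nat) :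
    ∀ (p : Nat), p < 5 * n →
      ((List.range n).flatMap (fun j => List.replicate 5 (f j)))[p]? = some (f (p / 5)) := by
  induction n with
  | zero => intro p hp; omega
  | succ n ih =>
    intro p hp
    rw [List.range_succ, List.flatMap_append, List.getElem?_append]
    by_cases h : p < 5 * n
    · rw [if_pos (by rw [fm_len]; exact h)]
      exact ih p h
    · rw [if_neg (by rw [fm_len]; exact h)]
      rw [fm_len]
      have h5 : p / 5 = n := by omega
      have hlt : p - 5 * n < 5 := by omega
      rw [List.flatMap_cons, List.flatMap_nil, List.append_nil, List.getElem?_replicate,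
          if_pos hlt, h5]

theorem pe_eq (arr : List Int) :
    proper_employment arr = proper_employment_alt arr := by
  have halt : proper_employment_alt arr =
      List.replicate 15 (0:Int)
        ++ (List.range 10).flatMap (fun (j : Nat) => List.replicate 5 (PySem.List.pyGetD arr (j : Int) 0))
        ++ List.replicate 36 (PySem.List.pyGetD arr (-1) 0) := by
    show ((0,15) :: _ : List (Int × Nat)).foldl _ [] = _
    rw [rld_eq, List.nil_append, List.flatMap_cons, List.flatMap_append, List.flatMap_map,
        List.flatMap_cons, List.flatMap_nil, List.append_nil, ← List.append_assoc]
  rw [halt]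
  apply List.ext_getElem?
  intro j
  have hf0 : ((PySem.List.pyRange 0 101 1).map (fun i => i)).length = 101 := by
    simp [PySem.List.length_pyRange_one]
  simp only [proper_employment]
  by_cases hj : j < 101
  · -- in range: compute both sides
    rw [fs_get (fun _ => PySem.List.pyGetD arr (-1) 0) 65 (by omega) 101 _ j
        (by rw [fs_len, fs_len, hf0]; exact hj)]
    rw [fs_get (fun i => PySem.List.pyGetD arr (PySem.Int.floordiv i 5 - 3) 0) 15 (by omega) 65 _ j
        (by rw [fs_len, hf0]; exact hj)]
    rw [fs_get (fun _ => (0 : Int)) 0 (by omega) 15 _ j (by rw [hf0]; exact hj)]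
    rw [List.getElem?_append, List.getElem?_append]
    simp only [List.length_replicate, List.length_append, fm_len]
    split_ifs with c1 c2 c3 c4 c5 c6 c7 c8 c9 c10 c11 <;>
      first
      | omega
      | rfl
      | (rw [List.getElem?_replicate]; split_ifs <;> first | rfl | omega)
      | (rw [fm_get (fun (k : Nat) => PySem.List.pyGetD arr (k : Int) 0) 10 (j - 15) (by omega)]
         have hidx : PySem.Int.floordiv (j : Int) 5 - 3 = (((j - 15) / 5 : Nat) : Int) := by
           have h5 : PySem.Int.floordiv (j : Int) 5 = (((j / 5 : Nat)) : Int) := by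
             exact_mod_cast PySem.Int.floordiv_natCast j 5
           rw [h5]; omega
         rw [hidx])
  · -- out of range: both sides are none
    rw [List.getElem?_eq_none (by rw [fs_len, fs_len, fs_len, hf0]; omega)]
    rw [List.getElem?_eq_none (by simp only [List.length_append, List.length_replicate, fm_len]; omega)]

-- ===== VERDICT (by name: the statement is the Claim_ definition above) =====
theorem proper_employment_spec : Claim_equal_proper_employment := by
  intro arr _ hpre
  unfold Spec_proper_employment
  exact pe_eq arr
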